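-- pv_equiv track=rewrite | github.com/huggingface/trl | examples/scripts/openenv/sudoku.py | extract_board_only
-- ===== SOURCE A (Python) =====
-- def extract_board_only(text: str) -> str:
--     """Extract just the Sudoku grid from a message."""
--     if not text:
--         return ""
--
--     lines = text.split("\n")
--     board_lines = []
--     in_board = False
--
--     for line in lines:
--         stripped = line.strip()
--         if stripped.startswith("C1") or (
--             stripped and stripped[0] == "R" and len(stripped) > 1 and stripped[1].isdigit()
--         ):
--             in_board = True
--         if in_board and (stripped.startswith("-") or stripped.startswith("R") or stripped.startswith("C1")):
--             board_lines.append(line)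
--         elif (
--             in_board
--             and stripped
--             and not stripped.startswith("-")
--             and not (stripped[0] == "R" and len(stripped) > 1 and stripped[1].isdigit())
--         ):
--             break
--
--     return "\n".join(board_lines) if board_lines else ""
-- ===== SOURCE B (Python) =====
-- def extract_board_only(text: str) -> str:
--     """Extract just the Sudoku grid: tag every line once, then pure index arithmetic on the tag list."""
--     lines = text.split("\n")
--
--     def tag(s):
--         if s.startswith(("-", "R", "C1")):
--             return "B"
--         return "E" if not s else "F"
--
--     def is_starter(s):
--         return s.startswith("C1") or (len(s) > 1 and s[0] == "R" and s[1].isdigit())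
--
--     tags = [tag(ln.strip()) for ln in lines]
--     start = next((i for i, ln in enumerate(lines) if is_starter(ln.strip())), None)
--     if start is None:
--         return ""
--     rest = tags[start:]
--     end = start + (rest.index("F") if "F" in rest else len(rest))
--     return "\n".join(ln for ln, t in zip(lines[start:end], tags[start:end]) if t == "B")
-- ===== Notes on version B (the rewrite author's own statement) =====
-- stated objective: alternative
-- what changed: Instead of A's stateful scan (an in_board flag threaded through one loop with trigger/append/break branches), B first maps every line to a category tag (board/empty/foreign), then computes the result purely by index arithmetic on that tag list: start = first starter index, end = start + position of the first foreign tag, answer = the board-tagged lines of the slice [start:end] joined.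
import Mathlib
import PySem

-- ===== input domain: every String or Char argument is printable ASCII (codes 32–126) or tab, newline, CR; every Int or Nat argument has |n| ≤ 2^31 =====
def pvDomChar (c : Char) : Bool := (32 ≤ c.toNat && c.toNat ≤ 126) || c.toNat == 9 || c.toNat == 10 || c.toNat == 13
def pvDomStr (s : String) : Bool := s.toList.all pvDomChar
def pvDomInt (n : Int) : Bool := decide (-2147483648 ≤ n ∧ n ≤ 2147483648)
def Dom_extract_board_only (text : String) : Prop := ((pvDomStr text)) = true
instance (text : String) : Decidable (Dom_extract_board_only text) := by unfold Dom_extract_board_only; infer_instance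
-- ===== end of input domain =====

-- B replaces A's stateful flag-driven scan by a tokenisation pass (one category tag per line)
-- followed by pure index arithmetic on the tag list; same result, no speed claim.

-- ===== PORT A =====
-- A's in_board trigger: stripped.startswith("C1") or (stripped and stripped[0]=="R" and len(stripped)>1 and stripped[1].isdigit())
def pvA_trigger (s : String) : Bool :=
  PySem.Str.startswith s "C1" ||
    (!(s == "") && (PySem.Str.pyGet? s 0 == some 'R') &&
      decide (1 < PySem.Str.len s) &&
      ((PySem.Str.pyGet? s 1).elim false PySem.Chars.isdigit))

-- A's for-loop with early break, state = (board_lines, in_board)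
def pvA_loop (lines board : List String) (inb : Bool) : List String :=
  match lines with
  | [] => board
  | line :: rest =>
    let stripped := PySem.Str.strip line
    let inb' := if pvA_trigger stripped then true else inb
    if inb' && (PySem.Str.startswith stripped "-" || PySem.Str.startswith stripped "R" ||
        PySem.Str.startswith stripped "C1") then
      pvA_loop rest (board ++ [line]) inb'
    else if inb' && !(stripped == "") && !(PySem.Str.startswith stripped "-") &&
        !((PySem.Str.pyGet? stripped 0 == some 'R') && decide (1 < PySem.Str.len stripped) &&
          ((PySem.Str.pyGet? stripped 1).elim false PySem.Chars.isdigit)) then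
      board                                   -- break
    else
      pvA_loop rest board inb'

def extract_board_only (text : String) : String :=
  if text == "" then ""
  else
    let lines := (PySem.Str.split? text "\n").getD []
    let board := pvA_loop lines [] false
    if board == [] then "" else PySem.Str.join "\n" board

-- ===== PORT B =====
-- Source B's tag(s): one category per stripped line — "B" board line, "E" empty, "F" foreign
def pvB_tag (s : String) : String :=
  if PySem.Str.startswith s "-" || PySem.Str.startswith s "R" ||
      PySem.Str.startswith s "C1" then "B"
  else if s == "" then "E" else "F"

-- Source B's is_starter(s)
def pvB_starter (s : String) : Bool :=
  PySem.Str.startswith s "C1" ||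
    (decide (1 < PySem.Str.len s) && (PySem.Str.pyGet? s 0 == some 'R') &&
      ((PySem.Str.pyGet? s 1).elim false PySem.Chars.isdigit))

def extract_board_only_alt (text : String) : String :=
  let lines := (PySem.Str.split? text "\n").getD []
  let tags := lines.map (fun ln => pvB_tag (PySem.Str.strip ln))
  match lines.findIdx? (fun ln => pvB_starter (PySem.Str.strip ln)) with
  | none => ""
  | some start =>
    let rest := tags.drop start
    let stop := start + (match PySem.List.index? rest "F" with
                         | some j => j
                         | none => rest.length)
    PySem.Str.join "\n"
      ((((lines.drop start).take (stop - start)).zip ((tags.drop start).take (stop - start))).filterMap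
        (fun p => if p.2 == "B" then some p.1 else none))

-- ===== PRECONDITION & SPEC =====
def Spec_extract_board_only (text : String) (out : String) : Prop := out = extract_board_only_alt text
instance (text : String) (out : String) : Decidable (Spec_extract_board_only text out) := by unfold Spec_extract_board_only; infer_instance

-- ===== CLAIM (what is proved, stated in full; the proofs are below) =====
def Claim_equal_extract_board_only : Prop := ∀ (text : String), Dom_extract_board_only text → Spec_extract_board_only text (extract_board_only text)

-- ===== LEMMAS AND PROOFS =====

-- proof-side view of A's in-board phase: collect by tag, stop at the first foreign line
def pvCollect (lines : List String) : List String :=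
  match lines with
  | [] => []
  | l :: rest =>
    if pvB_tag (PySem.Str.strip l) == "B" then l :: pvCollect rest
    else if pvB_tag (PySem.Str.strip l) == "E" then pvCollect rest
    else []

-- proof-side view of B's relative stop index
def pvE (tags : List String) : Nat :=
  match PySem.List.index? tags "F" with
  | some j => j
  | none => tags.length

theorem pvB_tag_cases (s : String) : pvB_tag s = "B" ∨ pvB_tag s = "E" ∨ pvB_tag s = "F" := by
  unfold pvB_tag; split_ifs <;> simp

theorem pvE_cons_ne (t : String) (ts : List String) (h : t ≠ "F") : pvE (t :: ts) = pvE ts + 1 := by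
  unfold pvE
  rw [PySem.List.index?_cons_of_ne (xs := ts) h]
  cases PySem.List.index? ts "F" <;> simp

theorem pvE_cons_F (ts : List String) : pvE ("F" :: ts) = 0 := by
  unfold pvE
  rw [PySem.List.index?_cons_self (x := "F") (xs := ts)]

-- A's trigger and B's starter predicate are the same Boolean
theorem pv_trigger_eq (s : String) : pvA_trigger s = pvB_starter s := by
  unfold pvA_trigger pvB_starter
  by_cases h : s = ""
  · subst h; decide
  · have hne : (s == "") = false := by simp [h]
    rw [hne]
    cases PySem.Str.startswith s "C1" <;>
      cases hR : (PySem.Str.pyGet? s 0 == some 'R') <;>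
        cases hL : decide (1 < PySem.Str.len s) <;> simp

-- a nonempty string whose first char is 'R' startswith "R"
theorem pv_head_R (s : String) (h : PySem.Str.pyGet? s 0 = some 'R') :
    PySem.Str.startswith s "R" = true := by
  have h' : s.toList[0]? = some 'R' := by
    simpa [PySem.List.pyGet?_zero] using h
  rw [PySem.Str.startswith_eq, PySem.Chars.startswith_iff]
  cases hs : s.toList with
  | nil => simp [hs] at h'
  | cons c t =>
    simp [hs] at h'
    refine ⟨t, ?_⟩
    have hR : ("R" : String).toList = ['R'] := by decide
    rw [hR]; simp [h']

-- if the starter predicate holds, so does the board-prefix test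
theorem pv_starter_append (s : String) (h : pvB_starter s = true) :
    (PySem.Str.startswith s "-" || PySem.Str.startswith s "R" ||
      PySem.Str.startswith s "C1") = true := by
  unfold pvB_starter at h
  rcases Bool.or_eq_true_iff.mp h with h1 | h2
  · rw [h1, Bool.or_true]
  · have hR : PySem.Str.pyGet? s 0 = some 'R' := by
      rcases Bool.and_eq_true_iff.mp h2 with ⟨h3, _⟩
      rcases Bool.and_eq_true_iff.mp h3 with ⟨_, h5⟩
      exact beq_iff_eq.mp h5
    rw [pv_head_R s hR, Bool.or_true, Bool.true_or]

-- a starter line is a board ("B") line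
theorem pv_starter_tag (s : String) (h : pvB_starter s = true) : pvB_tag s = "B" := by
  unfold pvB_tag
  rw [pv_starter_append s h]
  simp

-- once in_board is true, A's loop collects by tag
theorem pv_loop_true_eq_collect (lines : List String) :
    ∀ board, pvA_loop lines board true = board ++ pvCollect lines := by
  induction lines with
  | nil => intro board; simp [pvA_loop, pvCollect]
  | cons line rest ih =>
    intro board
    unfold pvA_loop
    conv_rhs => rw [pvCollect.eq_def]
    dsimp only
    rw [ite_self]
    by_cases happ : (PySem.Str.startswith (PySem.Str.strip line) "-" ||
        PySem.Str.startswith (PySem.Str.strip line) "R" ||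
        PySem.Str.startswith (PySem.Str.strip line) "C1") = true
    · have htag : pvB_tag (PySem.Str.strip line) = "B" := by unfold pvB_tag; rw [happ]; simp
      rw [happ, htag]
      simp only [ih (board ++ [line])]
      simp
    · have happf : (PySem.Str.startswith (PySem.Str.strip line) "-" ||
          PySem.Str.startswith (PySem.Str.strip line) "R" ||
          PySem.Str.startswith (PySem.Str.strip line) "C1") = false :=
        Bool.eq_false_iff.mpr happ
      rw [happf]
      have hcomp := happf
      rw [Bool.or_eq_false_iff, Bool.or_eq_false_iff] at hcomp
      obtain ⟨⟨hdash, hRsw⟩, _⟩ := hcomp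
      by_cases hne : PySem.Str.strip line = ""
      · have htag : pvB_tag (PySem.Str.strip line) = "E" := by
          unfold pvB_tag; rw [happf]; simp [hne]
        have hne' : (PySem.Str.strip line == "") = true := by simp [hne]
        rw [hne', htag]
        simpa using ih board
      · have htag : pvB_tag (PySem.Str.strip line) = "F" := by
          unfold pvB_tag; rw [happf]; simp [hne]
        have hne' : (PySem.Str.strip line == "") = false := by simp [hne]
        have hR0 : (PySem.Str.pyGet? (PySem.Str.strip line) 0 == some 'R') = false := by
          cases hx : (PySem.Str.pyGet? (PySem.Str.strip line) 0 == some 'R')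
          · rfl
          · have := pv_head_R _ (beq_iff_eq.mp hx)
            rw [this] at hRsw
            exact absurd hRsw (by simp)
        rw [hne', hdash, hR0, htag]
        simp

-- a non-starter line leaves A's out-of-board loop unchanged
theorem pv_loop_false_step (line : String) (rest board : List String)
    (h : pvB_starter (PySem.Str.strip line) = false) :
    pvA_loop (line :: rest) board false = pvA_loop rest board false := by
  conv_lhs => rw [pvA_loop.eq_def]
  dsimp only
  rw [pv_trigger_eq, h]
  rfl

-- a starter line switches A's loop into collect mode
theorem pv_loop_starter (line : String) (rest board : List String)
    (h : pvB_starter (PySem.Str.strip line) = true) :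
    pvA_loop (line :: rest) board false = board ++ pvCollect (line :: rest) := by
  conv_lhs => rw [pvA_loop.eq_def]
  dsimp only
  rw [pv_trigger_eq, h]
  have happ := pv_starter_append _ h
  rw [happ]
  have htag := pv_starter_tag _ h
  conv_rhs => rw [pvCollect.eq_def]
  dsimp only
  rw [htag]
  simp only [Bool.and_self, beq_self_eq_true, if_true]
  rw [pv_loop_true_eq_collect rest (board ++ [line])]
  simp

-- A's whole loop = find the first starter, then collect by tag
theorem pv_loop_eq_phases (lines : List String) :
    pvA_loop lines [] false =
      (match lines.findIdx? (fun ln => pvB_starter (PySem.Str.strip ln)) with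
       | none => []
       | some i => pvCollect (lines.drop i)) := by
  induction lines with
  | nil => rfl
  | cons line rest ih =>
    by_cases h : pvB_starter (PySem.Str.strip line) = true
    · rw [pv_loop_starter line rest [] h]
      simp [List.findIdx?_cons, h]
    · have h' : pvB_starter (PySem.Str.strip line) = false := Bool.eq_false_iff.mpr h
      rw [pv_loop_false_step line rest [] h', ih]
      simp only [List.findIdx?_cons, h']
      cases hf : rest.findIdx? (fun ln => pvB_starter (PySem.Str.strip ln)) <;> simp

-- collect-by-tag = B's take-to-first-foreign / zip / filter formula
theorem pv_collect_eq_formula (ys : List String) :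
    pvCollect ys =
      ((ys.take (pvE (ys.map (fun ln => pvB_tag (PySem.Str.strip ln))))).zip
        ((ys.map (fun ln => pvB_tag (PySem.Str.strip ln))).take
          (pvE (ys.map (fun ln => pvB_tag (PySem.Str.strip ln)))))).filterMap
        (fun p => if p.2 == "B" then some p.1 else none) := by
  induction ys with
  | nil => rfl
  | cons y rest ih =>
    rcases pvB_tag_cases (PySem.Str.strip y) with ht | ht | ht
    · rw [pvCollect.eq_def]; dsimp only
      simp only [List.map_cons, ht, pvE_cons_ne "B" _ (by decide), List.take_succ_cons,
        List.zip_cons_cons, List.filterMap_cons]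
      simp [ih]
    · rw [pvCollect.eq_def]; dsimp only
      simp only [List.map_cons, ht, pvE_cons_ne "E" _ (by decide), List.take_succ_cons,
        List.zip_cons_cons, List.filterMap_cons]
      simp [ih]
    · rw [pvCollect.eq_def]; dsimp only
      simp only [List.map_cons, ht, pvE_cons_F, List.take_zero, List.zip_nil_left,
        List.filterMap_nil]
      simp

-- when a starter exists, the collected board is nonempty
theorem pv_collect_nonempty (lines : List String) :
    ∀ i, lines.findIdx? (fun ln => pvB_starter (PySem.Str.strip ln)) = some i →
      pvCollect (lines.drop i) ≠ [] := by
  induction lines with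
  | nil => intro i h; simp at h
  | cons line rest ih =>
    intro i h
    rw [List.findIdx?_cons] at h
    by_cases hs : pvB_starter (PySem.Str.strip line) = true
    · rw [if_pos (by simpa using hs)] at h
      have : i = 0 := by simpa using h.symm
      subst this
      rw [List.drop_zero, pvCollect.eq_def]
      dsimp only
      rw [pv_starter_tag _ hs]
      simp
    · rw [if_neg (by simpa using hs)] at h
      rcases Option.map_eq_some_iff.mp h with ⟨j, hj, rfl⟩
      simpa using ih j hj

-- ===== VERDICT (by name: the statement is the Claim_ definition above) =====
theorem extract_board_only_spec : Claim_equal_extract_board_only := by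
  intro text _
  unfold Spec_extract_board_only extract_board_only extract_board_only_alt
  by_cases h : text = ""
  · subst h; decide
  · rw [if_neg (by simpa using h)]
    dsimp only
    rw [pv_loop_eq_phases]
    cases hf : ((PySem.Str.split? text "\n").getD []).findIdx?
        (fun ln => pvB_starter (PySem.Str.strip ln)) with
    | none => rfl
    | some i =>
      dsimp only
      have hne := pv_collect_nonempty _ i hf
      rw [if_neg (by simpa using hne)]
      have hdropmap : (((PySem.Str.split? text "\n").getD []).map
          (fun ln => pvB_tag (PySem.Str.strip ln))).drop i =
          (((PySem.Str.split? text "\n").getD []).drop i).map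
            (fun ln => pvB_tag (PySem.Str.strip ln)) := by
        rw [List.map_drop]
      rw [hdropmap]
      have hstop : ∀ (ts : List String),
          (i + (match PySem.List.index? ts "F" with
                | some j => j
                | none => ts.length)) - i = pvE ts := by
        intro ts; unfold pvE; cases PySem.List.index? ts "F" <;> omega
      rw [hstop]
      rw [pv_collect_eq_formula (((PySem.Str.split? text "\n").getD []).drop i)]
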